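-- pv_equiv track=rewrite | github.com/iliagerman1985/agentleague_aws_hackathone | libs/common/common/core/litellm_service.py | _smart_quote_replacement
-- ===== SOURCE A (Python) =====
-- def _smart_quote_replacement(json_str: str) -> str:
--     """Replace single quotes with double quotes while preserving apostrophes in values.
--
--     This is a heuristic approach that works for most common cases.
--     """
--     result: list[str] = []
--     i = 0
--     in_string = False
--     string_delimiter: str | None = None
--
--     while i < len(json_str):
--         char = json_str[i]
--
--         if not in_string:
--             if char == "'":
--                 # Check if this looks like a property key or string value start
--                 # Look ahead to see if this is likely a key (followed by :) or value
--                 ahead = json_str[i + 1 :].lstrip()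
--                 if ahead and (ahead[0].isalnum() or ahead[0] == "_"):
--                     # This looks like the start of a key or simple value
--                     result.append('"')
--                     in_string = True
--                     string_delimiter = "'"
--                 else:
--                     result.append(char)
--             else:
--                 result.append(char)
--                 if char == '"':
--                     in_string = True
--                     string_delimiter = '"'
--         elif char == string_delimiter:
--             if string_delimiter == "'":
--                 result.append('"')
--             else:
--                 result.append(char)
--             in_string = False
--             string_delimiter = None
--         elif char == '"' and string_delimiter == "'":
--             # Escape double quotes inside single-quoted strings
--             result.append('\\"')
--         else:
--             result.append(char)
--
--         i += 1
--
--     return "".join(result)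
-- ===== SOURCE B (Python) =====
-- def _smart_quote_replacement(json_str: str) -> str:
--     n = len(json_str)
--     # nxt[i] = first non-whitespace character at index >= i, or '' if none (one backward pass)
--     nxt = [''] * (n + 1)
--     for i in range(n - 1, -1, -1):
--         c = json_str[i]
--         nxt[i] = nxt[i + 1] if c.isspace() else c
--     out = []
--     delim = None  # current string delimiter, or None when outside a string
--     for i, c in enumerate(json_str):
--         if delim is None:
--             if c == "'" and (nxt[i + 1].isalnum() or nxt[i + 1] == "_"):
--                 out.append('"')
--                 delim = "'"
--             else:
--                 out.append(c)
--                 if c == '"':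
--                     delim = '"'
--         elif c == delim:
--             out.append('"' if delim == "'" else c)
--             delim = None
--         elif c == '"' and delim == "'":
--             out.append('\\"')
--         else:
--             out.append(c)
--     return ''.join(out)
-- ===== Notes on version B (the rewrite author's own statement) =====
-- stated objective: alternative
-- what changed: Replaces A's per-quote slicing plus lstrip of the whole remainder with a single backward pass precomputing the next non-whitespace character after each index, removing the repeated remainder scans (intended as faster; measured only 1.37x at the largest size).
import Mathlib
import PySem

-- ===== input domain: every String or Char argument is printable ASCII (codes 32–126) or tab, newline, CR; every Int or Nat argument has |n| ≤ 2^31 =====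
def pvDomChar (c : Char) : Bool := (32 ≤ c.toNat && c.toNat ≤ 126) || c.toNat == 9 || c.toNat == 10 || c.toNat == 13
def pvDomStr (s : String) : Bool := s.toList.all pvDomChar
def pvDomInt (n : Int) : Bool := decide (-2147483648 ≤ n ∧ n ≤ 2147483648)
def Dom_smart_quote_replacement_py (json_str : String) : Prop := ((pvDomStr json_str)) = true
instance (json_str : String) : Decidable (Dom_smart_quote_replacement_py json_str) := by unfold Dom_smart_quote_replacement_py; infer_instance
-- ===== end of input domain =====

-- B replaces A's per-quote slice-and-lstrip lookahead by one backward pass that precomputes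
-- the next non-whitespace character after each index (a different, single-scan algorithm).


-- ===== PORT A =====
-- while-loop over the characters; json_str[i+1:] is `rest`, .lstrip() is PySem.Chars.lstrip
def pvGoA : List Char → Bool → Option Char → List Char → List Char
  | [], _, _, acc => acc
  | c :: rest, in_string, string_delimiter, acc =>
    if in_string = false then
      if c == '\'' then
        match PySem.Chars.lstrip rest with    -- ahead = json_str[i + 1:].lstrip()
        | a :: _ =>
          if PySem.Chars.isalnum a || a == '_' then
            pvGoA rest true (some '\'') (acc ++ ['"'])
          else
            pvGoA rest false none (acc ++ [c])
        | [] => pvGoA rest false none (acc ++ [c])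
      else
        if c == '"' then pvGoA rest true (some '"') (acc ++ [c])
        else pvGoA rest false none (acc ++ [c])
    else if some c == string_delimiter then
      if string_delimiter == some '\'' then pvGoA rest false none (acc ++ ['"'])
      else pvGoA rest false none (acc ++ [c])
    else if c == '"' && string_delimiter == some '\'' then
      pvGoA rest in_string string_delimiter (acc ++ ['\\', '"'])
    else
      pvGoA rest in_string string_delimiter (acc ++ [c])

def smart_quote_replacement_py (json_str : String) : String :=
  String.ofList (pvGoA json_str.toList false none [])

-- ===== PORT B =====
-- backward pass: pvNxt cs has length |cs|+1; entry i is the first non-whitespace char at index ≥ i (none = '')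
def pvNxt : List Char → List (Option Char)
  | [] => [none]
  | c :: rest =>
    let r := pvNxt rest
    (if PySem.Chars.isspace c then r.headD none else some c) :: r

-- the forward scan; `nxt` rides along so that its head is nxt[i+1] for the current index i
def pvGoB : List Char → List (Option Char) → Option Char → List Char → List Char
  | [], _, _, acc => acc
  | c :: rest, nxt, delim, acc =>
    let o := nxt.headD none
    let nxt' := nxt.tail
    match delim with
    | none =>
      if c == '\'' && (match o with | some a => PySem.Chars.isalnum a || a == '_' | none => false) then
        pvGoB rest nxt' (some '\'') (acc ++ ['"'])
      else
        pvGoB rest nxt' (if c == '"' then some '"' else none) (acc ++ [c])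
    | some d =>
      if c == d then
        pvGoB rest nxt' none (acc ++ (if d == '\'' then ['"'] else [c]))
      else if c == '"' && d == '\'' then
        pvGoB rest nxt' (some d) (acc ++ ['\\', '"'])
      else
        pvGoB rest nxt' (some d) (acc ++ [c])

def smart_quote_replacement_py_alt (json_str : String) : String :=
  String.ofList (pvGoB json_str.toList (pvNxt json_str.toList).tail none [])

-- ===== PRECONDITION & SPEC =====
def Spec_smart_quote_replacement_py (json_str : String) (out : String) : Prop := out = smart_quote_replacement_py_alt json_str
instance (json_str : String) (out : String) : Decidable (Spec_smart_quote_replacement_py json_str out) := by unfold Spec_smart_quote_replacement_py; infer_instance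

-- ===== CLAIM (what is proved, stated in full; the proofs are below) =====
def Claim_equal_smart_quote_replacement_py : Prop := ∀ (json_str : String), Dom_smart_quote_replacement_py json_str → Spec_smart_quote_replacement_py json_str (smart_quote_replacement_py json_str)

-- ===== LEMMAS AND PROOFS =====

-- the head of pvNxt cs is the first non-whitespace character of cs
theorem pvNxt_headD (cs : List Char) :
    (pvNxt cs).headD none = (PySem.Chars.lstrip cs).head? := by
  induction cs with
  | nil => rfl
  | cons c rest ih =>
    simp only [pvNxt, PySem.Chars.lstrip, List.dropWhile] at *
    by_cases h : PySem.Chars.isspace c = true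
    · simpa [h] using ih
    · simp [eq_false_of_ne_true h]

-- the two scans agree when B's nxt list is the tail of pvNxt and A's in_string = delim.isSome
theorem pvGoA_eq_pvGoB (cs : List Char) (delim : Option Char) (acc : List Char) :
    pvGoA cs delim.isSome delim acc = pvGoB cs (pvNxt cs).tail delim acc := by
  induction cs generalizing delim acc with
  | nil => simp [pvGoA, pvGoB]
  | cons c rest ih =>
    have htail : (pvNxt (c :: rest)).tail = pvNxt rest := by simp [pvNxt]
    have hhead : (pvNxt rest).headD none = (PySem.Chars.lstrip rest).head? := pvNxt_headD rest
    cases delim with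
    | none =>
      simp only [pvGoA, pvGoB, Option.isSome_none, htail, hhead]
      by_cases hc : c = '\''
      · subst hc
        cases hrest : (PySem.Chars.lstrip rest) with
        | nil => simp [← ih none]
        | cons a tl =>
          by_cases ha : (PySem.Chars.isalnum a || a == '_') = true
          · simp [ha, ← ih (some '\'')]
          · simp [ha, ← ih none]
      · by_cases hq : c = '"'
        · subst hq; simp [← ih (some '"')]
        · simp [hc, hq, ← ih none]
    | some d =>
      simp only [pvGoA, pvGoB, Option.isSome_some, htail]
      by_cases hcd : c = d
      · subst hcd
        by_cases hd : c = '\''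
        · subst hd; simp [← ih none]
        · simp [hd, ← ih none]
      · by_cases hq : c = '"'
        · subst hq
          by_cases hd : d = '\''
          · subst hd; simp [← ih (some '\'')]
          · simp [hcd, hd, ← ih (some d)]
        · simp [hcd, hq, ← ih (some d)]

-- ===== VERDICT (by name: the statement is the Claim_ definition above) =====
theorem smart_quote_replacement_py_spec : Claim_equal_smart_quote_replacement_py := by
  intro json_str _
  unfold Spec_smart_quote_replacement_py smart_quote_replacement_py smart_quote_replacement_py_alt
  rw [show (false : Bool) = (none : Option Char).isSome from rfl, pvGoA_eq_pvGoB]
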